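-- pv_equiv track=rewrite | github.com/EvanSilva/Frankenstains-Workshop | Workshop/NumeroMasPequeño.py | first_n_smallest
-- ===== SOURCE A (Python) =====
-- def first_n_smallest(arr, n):
--         smallList = arr[:]
--         while len(smallList) > n:
--             maxNumber = max(smallList)
--             smallList.reverse()
--             smallList.remove(maxNumber)
--             smallList.reverse()
--
--
--         return smallList
-- ===== SOURCE B (Python) =====
-- def first_n_smallest(arr, n):
--     # One sort to find the threshold value, then a single pass keeping
--     # everything below it plus the earliest occurrences at the threshold.
--     if n <= 0:
--         return []
--     if n >= len(arr):
--         return arr[:]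
--     v = sorted(arr)[n - 1]
--     quota = n - sum(1 for x in arr if x < v)
--     out = []
--     for x in arr:
--         if x < v:
--             out.append(x)
--         elif x == v and quota > 0:
--             out.append(x)
--             quota -= 1
--     return out
-- ===== Notes on version B (the rewrite author's own statement) =====
-- stated objective: faster
-- what changed: A repeatedly scans for the max and deletes its last occurrence until n elements remain; B sorts once to find the n-th smallest value as a threshold and emits survivors in one pass (all elements below the threshold plus the earliest occurrences equal to it).
import Mathlib
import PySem

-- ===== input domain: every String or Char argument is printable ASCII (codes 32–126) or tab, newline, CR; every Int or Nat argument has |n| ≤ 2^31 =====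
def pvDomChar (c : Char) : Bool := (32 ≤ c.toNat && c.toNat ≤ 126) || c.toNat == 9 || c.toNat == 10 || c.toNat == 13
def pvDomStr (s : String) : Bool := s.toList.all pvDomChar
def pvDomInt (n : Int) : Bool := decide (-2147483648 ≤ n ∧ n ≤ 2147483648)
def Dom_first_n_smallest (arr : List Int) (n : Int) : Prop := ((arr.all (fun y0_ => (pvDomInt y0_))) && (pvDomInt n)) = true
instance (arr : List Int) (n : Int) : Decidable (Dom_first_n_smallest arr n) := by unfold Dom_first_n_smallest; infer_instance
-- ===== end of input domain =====

-- B replaces A's repeated max-scan-and-delete loop by one sort (to find the n-th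
-- smallest value as a threshold) and a single pass; equivalence is proved on n ≥ 0.

-- ===== PORT A =====
-- while len > n: max, reverse, remove first occurrence (= last occurrence), reverse
def first_n_smallest (arr : List Int) (n : Int) : List Int :=
  if (arr.length : Int) > n then
    match PySem.List.max? arr (fun x => x) with
    | none => arr   -- Python: max([]) raises ValueError here (outside Pre_)
    | some m =>
      match _hr : PySem.List.remove? arr.reverse m with
      | none => arr -- unreachable: the max is a member of the list
      | some r => first_n_smallest r.reverse n
  else arr
termination_by arr.length
decreasing_by
  have hmem : m ∈ arr.reverse := by
    by_contra hno
    rw [(PySem.List.remove?_eq_none_iff arr.reverse m).2 hno] at _hr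
    cases _hr
  rw [PySem.List.remove?_eq_some_erase arr.reverse m hmem] at _hr
  injection _hr with h
  subst h
  have h1 : (arr.reverse.erase m).length = arr.reverse.length - 1 := List.length_erase_of_mem hmem
  have h2 : 0 < arr.reverse.length := List.length_pos_of_mem hmem
  simp only [List.length_reverse] at *
  omega

-- ===== PORT B =====
-- v = sorted(arr)[n-1]  (in range whenever 0 < n < len(arr); .getD 0 only totalizes)
def pvV (arr : List Int) (n : Int) : Int :=
  (PySem.List.pyGet? (PySem.List.sorted arr (fun x => x) false) (n - 1)).getD 0

-- quota = n - sum(1 for x in arr if x < v)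
def pvQ (arr : List Int) (n : Int) : Int :=
  n - (arr.countP (fun x => decide (x < pvV arr n)) : Int)

-- the single pass: keep x < v always, keep x == v while quota lasts
def pvAltScan (v : Int) : List Int → Int → List Int
  | [], _ => []
  | x :: xs, q =>
    if x < v then x :: pvAltScan v xs q
    else if x = v ∧ 0 < q then x :: pvAltScan v xs (q - 1)
    else pvAltScan v xs q

def first_n_smallest_alt (arr : List Int) (n : Int) : List Int :=
  if n ≤ 0 then []
  else if (arr.length : Int) ≤ n then arr
  else pvAltScan (pvV arr n) arr (pvQ arr n)

-- ===== PRECONDITION & SPEC =====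
-- A returns exactly when n ≥ 0; for n < 0 its loop empties the list and max([]) raises ValueError.
def Pre_first_n_smallest (arr : List Int) (n : Int) : Prop := 0 ≤ n
instance (arr : List Int) (n : Int) : Decidable (Pre_first_n_smallest arr n) := by
  unfold Pre_first_n_smallest; infer_instance

def pvWitness_first_n_smallest : List Int × Int := ([3, 1, 2, 1], 2)

def Spec_first_n_smallest (arr : List Int) (n : Int) (out : List Int) : Prop :=
  out = first_n_smallest_alt arr n
instance (arr : List Int) (n : Int) (out : List Int) : Decidable (Spec_first_n_smallest arr n out) := by
  unfold Spec_first_n_smallest; infer_instance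

-- ===== CLAIM (what is proved, stated in full; the proofs are below) =====
def Claim_equal_first_n_smallest : Prop := ∀ (arr : List Int) (n : Int), Dom_first_n_smallest arr n → Pre_first_n_smallest arr n → Spec_first_n_smallest arr n (first_n_smallest arr n)

-- ===== LEMMAS AND PROOFS =====

-- the scan keeps everything when all elements are ≤ v and the quota covers all copies of v
theorem pvAltScan_all (v : Int) (l : List Int) (q : Int)
    (hle : ∀ x ∈ l, x ≤ v) (hq : (l.countP (fun x => decide (x = v)) : Int) ≤ q) :
    pvAltScan v l q = l := by
  induction l generalizing q with
  | nil => rfl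
  | cons x xs ih =>
    have hxv : x ≤ v := hle x (List.mem_cons_self)
    have hle' : ∀ y ∈ xs, y ≤ v := fun y hy => hle y (List.mem_cons_of_mem x hy)
    rw [List.countP_cons] at hq
    rcases lt_or_eq_of_le hxv with hlt | heq
    · have : (decide (x = v)) = false := by simp; omega
      rw [this] at hq
      simp only [pvAltScan, if_pos hlt]
      rw [ih q hle' (by push_cast at hq ⊢; omega)]
    · subst heq
      have hq0 : 0 < q := by simp at hq; push_cast at hq; omega
      simp only [pvAltScan]
      rw [if_neg (lt_irrefl x), if_pos (show True ∧ 0 < q from ⟨trivial, hq0⟩),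
        ih (q - 1) hle' (by simp at hq; push_cast at hq ⊢; omega)]

-- deleting an element strictly above the threshold does not change the scan
theorem pvAltScan_skip_gt (v m : Int) (a b : List Int) (q : Int) (hvm : v < m) :
    pvAltScan v (a ++ m :: b) q = pvAltScan v (a ++ b) q := by
  induction a generalizing q with
  | nil =>
    simp only [List.nil_append, pvAltScan]
    rw [if_neg (by omega), if_neg (by rintro ⟨rfl, -⟩; omega)]
  | cons x a ih =>
    simp only [List.cons_append, pvAltScan]
    split_ifs <;> rw [ih]

-- deleting a copy of v whose predecessors already exhaust the quota does not change the scan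
theorem pvAltScan_skip_eq (v : Int) (a b : List Int) (q : Int)
    (hq : q ≤ (a.countP (fun x => decide (x = v)) : Int)) :
    pvAltScan v (a ++ v :: b) q = pvAltScan v (a ++ b) q := by
  induction a generalizing q with
  | nil =>
    simp only [List.countP_nil, Nat.cast_zero] at hq
    simp only [List.nil_append, pvAltScan]
    rw [if_neg (lt_irrefl v), if_neg (by rintro ⟨-, h⟩; omega)]
  | cons x a ih =>
    rw [List.countP_cons] at hq
    simp only [List.cons_append, pvAltScan]
    by_cases hxv : x < v
    · have : (decide (x = v)) = false := by simp; omega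
      rw [this] at hq
      rw [if_pos hxv, if_pos hxv, ih q (by push_cast at hq ⊢; omega)]
    · rw [if_neg hxv, if_neg hxv]
      by_cases hx : x = v ∧ 0 < q
      · have : (decide (x = v)) = true := by simp [hx.1]
        rw [this] at hq
        rw [if_pos hx, if_pos hx, ih (q-1) (by push_cast at hq ⊢; omega)]
      · rw [if_neg hx, if_neg hx]
        refine ih q ?_
        by_cases hx2 : x = v
        · have hq0 : ¬ 0 < q := fun h => hx ⟨hx2, h⟩
          push_cast; omega
        · have : (decide (x = v)) = false := by simp [hx2]
          rw [this] at hq; push_cast at hq ⊢; omega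

-- removing one maximal element from l (as a multiset) drops the last element of sorted(l)
theorem pvSortedErase (l : List Int) (m : Int) (hm : m ∈ l) (hmax : ∀ x ∈ l, x ≤ m)
    (l' : List Int) (hperm : l'.Perm (l.erase m)) :
    PySem.List.sorted l' (fun x => x) false = (PySem.List.sorted l (fun x => x) false).dropLast := by
  have hsp : (PySem.List.sorted l (fun x => x) false).Perm l := PySem.List.sorted_perm l _ false
  have hsne : PySem.List.sorted l (fun x => x) false ≠ [] := by
    intro e
    have := hsp.length_eq
    rw [e] at this
    exact absurd (List.length_eq_zero_iff.1 this.symm) (List.ne_nil_of_mem hm)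
  set s := PySem.List.sorted l (fun x => x) false with hs
  have hpw : s.Pairwise (fun a b => a ≤ b) := PySem.List.sorted_pairwise l (fun x => x)
  have hdl : s.dropLast ++ [s.getLast hsne] = s := List.dropLast_append_getLast hsne
  have hlast : s.getLast hsne = m := by
    apply le_antisymm
    · exact hmax _ (hsp.mem_iff.1 (List.getLast_mem hsne))
    · have hms : m ∈ s := hsp.mem_iff.2 hm
      rw [← hdl] at hms hpw
      rcases List.mem_append.1 hms with hmd | hml
      · exact (List.pairwise_append.1 hpw).2.2 m hmd _ (List.mem_singleton_self _)
      · exact le_of_eq (List.mem_singleton.1 hml)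
  have hperm2 : (s.dropLast).Perm (l.erase m) := by
    have hsm : s = s.dropLast ++ [m] := by rw [← hlast]; exact hdl.symm
    have h2 : (s.dropLast ++ [m]).Perm (m :: s.dropLast) := List.perm_append_singleton m s.dropLast
    rw [← hsm] at h2
    have h1 : l.Perm (m :: s.dropLast) := hsp.symm.trans h2
    have h3 := h1.erase m
    rw [List.erase_cons_head] at h3
    exact h3.symm
  exact PySem.List.sorted_id_eq_of_perm_of_pairwise l' s.dropLast
    (hperm2.trans hperm.symm) (hpw.sublist (List.dropLast_sublist s))

-- on 0 < n ≤ len, B is exactly the threshold scan (for n = len the scan keeps everything)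
theorem pvBridge (l : List Int) (n : Int) (h0 : 0 < n) (hlen : n ≤ (l.length : Int)) :
    first_n_smallest_alt l n = pvAltScan (pvV l n) l (pvQ l n) := by
  unfold first_n_smallest_alt
  rw [if_neg (by omega)]
  by_cases h : (l.length : Int) ≤ n
  · rw [if_pos h]
    set s := PySem.List.sorted l (fun x => x) false with hs
    have hsl : s.length = l.length := PySem.List.length_sorted l _ false
    have hidx : n - 1 < (s.length : Int) := by omega
    have hvg : pvV l n = s[(n-1).toNat]'(by omega) := by
      have hg := PySem.List.pyGet?_eq_some_getElem s (i := n - 1) (by omega) hidx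
      unfold pvV
      rw [← hs, hg, Option.getD_some]
    have hub : ∀ x ∈ l, x ≤ pvV l n := by
      intro x hx
      have hxs : x ∈ s := ((PySem.List.sorted_perm l _ false).mem_iff).2 hx
      obtain ⟨j, hj, hje⟩ := List.mem_iff_getElem.1 hxs
      rw [hvg, ← hje]
      exact PySem.List.sorted_id_getElem_mono l (p := j) (q := (n-1).toNat)
        (by omega) (by rw [← hs]; omega)
    have hcnt : (l.countP (fun x => decide (x = pvV l n)) : Int) ≤ pvQ l n := by
      unfold pvQ
      have hsplit := List.length_eq_countP_add_countP (fun x => decide (x = pvV l n)) (l := l)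
      have hmono : l.countP (fun x => decide (x < pvV l n)) ≤
          l.countP (fun x => decide ¬(decide (x = pvV l n)) = true) := by
        apply List.countP_mono_left
        intro x _ hx
        simp at hx ⊢
        omega
      push_cast
      omega
    exact (pvAltScan_all _ l _ hub hcnt).symm
  · rw [if_neg h]

-- one deletion step of A does not change threshold, quota or scan result
theorem pvStep (l : List Int) (n m : Int) (h0 : 0 < n) (hlt : n < (l.length : Int))
    (hm : m ∈ l) (hmax : ∀ x ∈ l, x ≤ m) (l' : List Int) (hperm : l'.Perm (l.erase m))
    (A1 B1 : List Int) (hdec : l = A1 ++ m :: B1) (hB : m ∉ B1) (hl' : l' = A1 ++ B1) :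
    pvV l' n = pvV l n ∧ pvQ l' n = pvQ l n ∧
    pvAltScan (pvV l n) l (pvQ l n) = pvAltScan (pvV l n) l' (pvQ l n) := by
  have hdrop := pvSortedErase l m hm hmax l' hperm
  set s := PySem.List.sorted l (fun x => x) false with hs
  have hsl : s.length = l.length := PySem.List.length_sorted l _ false
  have hl'len : l'.length = l.length - 1 := by
    rw [hl', hdec]; simp
  have hlpos : 0 < l.length := List.length_pos_of_mem hm
  have hvg : pvV l n = s[(n-1).toNat]'(by omega) := by
    have hg := PySem.List.pyGet?_eq_some_getElem s (i := n - 1) (by omega) (by omega)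
    unfold pvV
    rw [← hs, hg, Option.getD_some]
  have hv : pvV l' n = pvV l n := by
    have hdlen : s.dropLast.length = l.length - 1 := by rw [List.length_dropLast, hsl]
    have hg := PySem.List.pyGet?_eq_some_getElem s.dropLast (i := n - 1) (by omega)
      (by rw [hdlen]; omega)
    have hg2 := PySem.List.pyGet?_eq_some_getElem s (i := n - 1) (by omega) (by omega)
    unfold pvV
    rw [hdrop, ← hs, hg, Option.getD_some, hg2, Option.getD_some]
    exact List.getElem_dropLast _
  have hvm : pvV l n ≤ m := by
    have : pvV l n ∈ l := by
      rw [hvg]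
      exact ((PySem.List.sorted_perm l _ false).mem_iff).1 (List.getElem_mem _)
    exact hmax _ this
  have hcount : ∀ p : Int → Bool, p m = false → l'.countP p = l.countP p := by
    intro p hp
    rw [hperm.countP_eq, ((List.perm_cons_erase hm).countP_eq p), List.countP_cons, hp]
    simp
  have hq : pvQ l' n = pvQ l n := by
    unfold pvQ
    rw [hv, hcount _ (by simp; omega)]
  refine ⟨hv, hq, ?_⟩
  rcases lt_or_eq_of_le hvm with hlt2 | heq
  · have hstep := pvAltScan_skip_gt (pvV l n) m A1 B1 (pvQ l n) hlt2
    rw [← hdec] at hstep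
    rw [hl']
    exact hstep
  · -- quota ≤ number of copies of v before the removed (last) copy
    have hBcnt : B1.countP (fun x => decide (x = pvV l n)) = 0 := by
      rw [List.countP_eq_zero]
      intro x hx
      simp
      intro hxe
      have : m ∈ B1 := by rw [← heq, ← hxe]; exact hx
      exact hB this
    have hlcnt : l.countP (fun x => decide (x = pvV l n)) =
        A1.countP (fun x => decide (x = pvV l n)) + 1 := by
      have h1 := congrArg (List.countP (fun x => decide (x = pvV l n))) hdec
      rw [List.countP_append, List.countP_cons, hBcnt] at h1
      rw [h1]
      simp [heq]
    have hsplit := List.length_eq_countP_add_countP (fun x => decide (x = pvV l n)) (l := l)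
    have hcongr : l.countP (fun x => decide ¬(decide (x = pvV l n)) = true) =
        l.countP (fun x => decide (x < pvV l n)) := by
      apply List.countP_congr
      intro x hx
      have hxm : x ≤ m := hmax x hx
      simp
      omega
    have hcnt : pvQ l n ≤ (A1.countP (fun x => decide (x = pvV l n)) : Int) := by
      unfold pvQ
      push_cast at *
      omega
    have hstep := pvAltScan_skip_eq (pvV l n) A1 B1 (pvQ l n) hcnt
    have hlist : A1 ++ pvV l n :: B1 = l := by rw [heq]; exact hdec.symm
    rw [hlist] at hstep
    rw [hl']
    exact hstep
theorem pvMain : ∀ (k : Nat) (l : List Int), l.length = k → ∀ (n : Int), 0 ≤ n →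
    first_n_smallest l n = first_n_smallest_alt l n := by
  intro k
  induction k using Nat.strong_induction_on with
  | _ k IH =>
    intro l hk n hn
    by_cases h : (l.length : Int) ≤ n
    · rw [first_n_smallest, if_neg (by omega)]
      unfold first_n_smallest_alt
      by_cases h0 : n ≤ 0
      · have : l = [] := List.length_eq_zero_iff.1 (by omega)
        rw [if_pos h0, this]
      · rw [if_neg h0, if_pos h]
    · -- one deletion step, then the induction hypothesis
      have hne : l ≠ [] := by
        intro e
        rw [e] at h
        simp at h
        omega
      obtain ⟨m, hmax⟩ : ∃ m, PySem.List.max? l (fun x => x) = some m := by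
        cases hm : PySem.List.max? l (fun x => x) with
        | none => exact absurd ((PySem.List.max?_eq_none_iff l _).1 hm) hne
        | some m => exact ⟨m, rfl⟩
      have hmem := PySem.List.max?_mem hmax
      have hub : ∀ x ∈ l, x ≤ m := PySem.List.max?_isMax hmax
      have hmr : m ∈ l.reverse := by simpa using hmem
      have hrem := PySem.List.remove?_eq_some_erase l.reverse m hmr
      have hunf : first_n_smallest l n = first_n_smallest (l.reverse.erase m).reverse n := by
        rw [first_n_smallest, if_pos (by omega), hmax]
        show (match _hr : PySem.List.remove? l.reverse m with
          | none => l
          | some r => first_n_smallest r.reverse n) = _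
        split
        · rename_i heq2
          rw [heq2] at hrem
          cases hrem
        · rename_i r hr2
          rw [hr2] at hrem
          injection hrem with he
          rw [he]
      rw [hunf]
      set l' := (l.reverse.erase m).reverse with hl'def
      have hlen' : l'.length = l.length - 1 := by
        rw [hl'def, List.length_reverse, List.length_erase_of_mem hmr, List.length_reverse]
      have hlpos : 0 < l.length := List.length_pos_of_mem hmem
      rw [IH l'.length (by omega) l' rfl n hn]
      -- it remains to show B is unchanged by the deletion
      by_cases h0 : n ≤ 0
      · unfold first_n_smallest_alt
        rw [if_pos h0, if_pos h0]
      · obtain ⟨l₁, l₂, hnotin, hrevEq, heraseEq⟩ := List.exists_erase_eq hmr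
        have hldec : l = l₂.reverse ++ m :: l₁.reverse := by
          have := congrArg List.reverse hrevEq
          rw [List.reverse_reverse] at this
          rw [this]
          simp
        have hl'dec : l' = l₂.reverse ++ l₁.reverse := by
          rw [hl'def, heraseEq]
          simp
        have hperm : l'.Perm (l.erase m) :=
          (l.reverse.erase m).reverse_perm.trans (l.reverse_perm.erase m)
        have hB : m ∉ l₁.reverse := by simpa using hnotin
        obtain ⟨hv, hq, hscan⟩ := pvStep l n m (by omega) (by omega) hmem hub l' hperm
          l₂.reverse l₁.reverse hldec hB hl'dec
        rw [pvBridge l' n (by omega) (by rw [hlen']; push_cast; omega),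
          pvBridge l n (by omega) (by omega), hv, hq, hscan]

-- ===== VERDICT (by name: the statement is the Claim_ definition above) =====
theorem first_n_smallest_spec : Claim_equal_first_n_smallest := by
  intro arr n _ hpre
  unfold Spec_first_n_smallest
  exact pvMain arr.length arr rfl n hpre
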